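-- pv_equiv track=rewrite | github.com/peterlevi/euler | 109.py | c
-- ===== SOURCE A (Python) =====
-- doubles = [2*x for x in range(1, 21)] + [50]
--
-- allp = sorted([x for x in range(1, 21)] + [25] + doubles + [3*x for x in range(1, 21)])
--
-- def c(n):
--     cnt = 0
--     for d in doubles:
--         if d > n:
--             break
--         if d == n:
--             cnt += 1
--             break
--         r = n - d
--         for i in range(0, len(allp)):
--             if allp[i] == r:
--                 cnt += 1
--             if allp[i] > r:
--                 break
--             for j in range(i, len(allp)):
--                 if allp[i] + allp[j] == r:
--                     cnt += 1
--                 if allp[i] + allp[j] > r: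
--                     break
--
--     return cnt
-- ===== SOURCE B (Python) =====
-- from collections import Counter
-- from itertools import combinations_with_replacement
--
-- doubles = [2*x for x in range(1, 21)] + [50]
--
-- allp = sorted([x for x in range(1, 21)] + [25] + doubles + [3*x for x in range(1, 21)])
--
-- SINGLE = Counter(allp)
-- PAIRSUM = Counter(a + b for a, b in combinations_with_replacement(allp, 2))
--
-- def c(n):
--     cnt = 0
--     for d in doubles:
--         if d > n:
--             break
--         if d == n:
--             cnt += 1
--         else:
--             cnt += SINGLE[n - d] + PAIRSUM[n - d]
--     return cnt
-- ===== Notes on version B (the rewrite author's own statement) =====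
-- stated objective: simpler
-- what changed: B precomputes two Counters (multiplicities of single values and of all pair sums over combinations_with_replacement) once at module level, replacing A's nested per-double scans over allp with two dictionary lookups per double.
import Mathlib
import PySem

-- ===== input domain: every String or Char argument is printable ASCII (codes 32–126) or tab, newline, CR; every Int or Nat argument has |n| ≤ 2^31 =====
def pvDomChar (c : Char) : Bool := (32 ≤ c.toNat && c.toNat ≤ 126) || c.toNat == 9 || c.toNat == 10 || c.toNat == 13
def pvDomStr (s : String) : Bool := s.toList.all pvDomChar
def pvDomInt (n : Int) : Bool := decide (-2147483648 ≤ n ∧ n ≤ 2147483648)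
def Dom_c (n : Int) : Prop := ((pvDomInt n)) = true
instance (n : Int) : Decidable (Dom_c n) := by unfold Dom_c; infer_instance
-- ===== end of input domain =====

-- B replaces A's nested per-double scans of allp by two precomputed Counters (single values
-- and pair sums) looked up per double: simpler per-call work, same return value.

-- ===== PORT A =====
def doublesA : List Int := (PySem.List.pyRange 1 21 1).map (fun x => 2 * x) ++ [50]

def allpA : List Int :=
  PySem.List.sorted
    (PySem.List.pyRange 1 21 1 ++ [25] ++ doublesA ++ (PySem.List.pyRange 1 21 1).map (fun x => 3 * x))
    (fun x => x) false

-- inner 'for j in range(i, len(allp))' loop, over the suffix of allp starting at i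
def jloopA (x r : Int) : List Int → Int → Int
  | [], cnt => cnt
  | y :: ys, cnt =>
    let cnt := if x + y == r then cnt + 1 else cnt
    if x + y > r then cnt else jloopA x r ys cnt

-- 'for i in range(0, len(allp))' loop, over suffixes of allp
def iloopA (r : Int) : List Int → Int → Int
  | [], cnt => cnt
  | x :: xs, cnt =>
    let cnt := if x == r then cnt + 1 else cnt
    if x > r then cnt else iloopA r xs (jloopA x r (x :: xs) cnt)

-- 'for d in doubles' loop
def dloopA (n : Int) : List Int → Int → Int
  | [], cnt => cnt
  | d :: ds, cnt =>
    if d > n then cnt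
    else if d == n then cnt + 1
    else dloopA n ds (iloopA (n - d) allpA cnt)

def c (n : Int) : Int := dloopA n doublesA 0

-- ===== PORT B =====
def doublesB : List Int := (PySem.List.pyRange 1 21 1).map (fun x => 2 * x) ++ [50]

def allpB : List Int :=
  PySem.List.sorted
    (PySem.List.pyRange 1 21 1 ++ [25] ++ doublesB ++ (PySem.List.pyRange 1 21 1).map (fun x => 3 * x))
    (fun x => x) false

-- sums over itertools.combinations_with_replacement(l, 2), in order
def cwrSums : List Int → List Int
  | [] => []
  | x :: xs => (x :: xs).map (fun y => x + y) ++ cwrSums xs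

def singleB : PySem.Dict Int Int := PySem.Dict.counter allpB

def pairB : PySem.Dict Int Int := PySem.Dict.counter (cwrSums allpB)

def dloopB (n : Int) : List Int → Int → Int
  | [], cnt => cnt
  | d :: ds, cnt =>
    if d > n then cnt
    else if d == n then dloopB n ds (cnt + 1)
    else dloopB n ds (cnt + (singleB.getD (n - d) 0 + pairB.getD (n - d) 0))

def c_alt (n : Int) : Int := dloopB n doublesB 0

-- ===== PRECONDITION & SPEC =====
def Spec_c (n : Int) (out : Int) : Prop := out = c_alt n
instance (n : Int) (out : Int) : Decidable (Spec_c n out) := by unfold Spec_c; infer_instance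

-- ===== CLAIM (what is proved, stated in full; the proofs are below) =====
def Claim_equal_c : Prop := ∀ (n : Int), Dom_c n → Spec_c n (c n)

-- ===== LEMMAS AND PROOFS =====

theorem mem_cwrSums {s : Int} : ∀ {l : List Int}, s ∈ cwrSums l → ∃ a ∈ l, ∃ b ∈ l, s = a + b := by
  intro l
  induction l with
  | nil => simp [cwrSums]
  | cons x xs ih =>
    intro hs
    simp only [cwrSums, List.mem_append, List.mem_map] at hs
    rcases hs with ⟨y, hy, rfl⟩ | hs
    · exact ⟨x, by simp, y, by simpa using hy, rfl⟩
    · rcases ih hs with ⟨a, ha, b, hb, rfl⟩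
      exact ⟨a, by simp [ha], b, by simp [hb], rfl⟩

theorem jloopA_eq (x r : Int) :
    ∀ (l : List Int), l.Pairwise (· ≤ ·) → ∀ cnt,
      jloopA x r l cnt = cnt + ((l.countP (fun y => x + y == r) : Nat) : Int) := by
  intro l
  induction l with
  | nil => intro _ cnt; simp [jloopA]
  | cons y ys ih =>
    intro hp cnt
    rcases List.pairwise_cons.mp hp with ⟨hle, hp'⟩
    by_cases heq : x + y = r
    · simp [jloopA, heq, ih hp']
      ring
    · have hbeq : (x + y == r) = false := by simpa using heq
      by_cases hgt : x + y > r
      · have hz : ys.countP (fun y => x + y == r) = 0 := by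
          rw [List.countP_eq_zero]
          intro z hz
          have : y ≤ z := hle z hz
          simp only [beq_iff_eq]
          omega
        simp [jloopA, hbeq, hgt, hz]
      · simp [jloopA, hbeq, hgt, ih hp']

theorem iloopA_eq (r : Int) :
    ∀ (l : List Int), l.Pairwise (· ≤ ·) → (∀ z ∈ l, 1 ≤ z) → ∀ cnt,
      iloopA r l cnt = cnt + ((l.countP (· == r) : Nat) : Int)
        + (((cwrSums l).countP (· == r) : Nat) : Int) := by
  intro l
  induction l with
  | nil => intro _ _ cnt; simp [iloopA, cwrSums]
  | cons x xs ih =>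
    intro hp hpos cnt
    rcases List.pairwise_cons.mp hp with ⟨hle, hp'⟩
    have hcwr : (cwrSums (x :: xs)).countP (· == r)
        = ((x :: xs).map (fun y => x + y)).countP (· == r) + (cwrSums xs).countP (· == r) := by
      simp only [cwrSums, List.countP_append]
    have hmap : ((x :: xs).map (fun y => x + y)).countP (· == r)
        = (x :: xs).countP (fun y => x + y == r) := by
      rw [List.countP_map]
      simp [Function.comp_def]
    by_cases hgt : x > r
    · have hbeq : (x == r) = false := by simp; omega
      have hz1 : (x :: xs).countP (· == r) = 0 := by
        rw [List.countP_eq_zero]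
        intro z hz
        rcases List.mem_cons.mp hz with rfl | hz'
        · simp; omega
        · have := hle z hz'
          simp only [beq_iff_eq]; omega
      have hz2 : (cwrSums (x :: xs)).countP (· == r) = 0 := by
        rw [List.countP_eq_zero]
        intro s hs
        rcases mem_cwrSums hs with ⟨a, ha, b, hb, rfl⟩
        have ha1 : x ≤ a := by
          rcases List.mem_cons.mp ha with rfl | h; · omega
          · exact hle a h
        have hb1 : 1 ≤ b := hpos b hb
        simp only [beq_iff_eq]; omega
      simp [iloopA, hbeq, hgt, hz1, hz2]
    · have hpos' : ∀ z ∈ xs, 1 ≤ z := fun z hz => hpos z (List.mem_cons_of_mem _ hz)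
      have hj := jloopA_eq x r (x :: xs) hp
      by_cases heq : x = r
      · subst heq
        simp only [iloopA, beq_self_eq_true, if_true, gt_iff_lt, lt_irrefl, if_false,
          ih hp' hpos', hj, hcwr, hmap, List.countP_cons]
        push_cast
        ring
      · have hbeq : (x == r) = false := by simpa using heq
        simp only [iloopA, hbeq, if_false, hgt, ih hp' hpos', hj, hcwr, hmap,
          List.countP_cons]
        push_cast
        ring

theorem allpA_pairwise : allpA.Pairwise (· ≤ ·) := by
  have h := PySem.List.sorted_pairwise
    (PySem.List.pyRange 1 21 1 ++ [25] ++ doublesA ++ (PySem.List.pyRange 1 21 1).map (fun x => 3 * x))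
    (fun x : Int => x)
  simpa [allpA] using h

theorem allpA_pos : ∀ z ∈ allpA, 1 ≤ z := by decide

theorem inner_eq (r : Int) (cnt : Int) :
    iloopA r allpA cnt = cnt + (singleB.getD r 0 + pairB.getD r 0) := by
  have hA : allpB = allpA := rfl
  have h1 : singleB.getD r 0 = ((allpA.count r : Nat) : Int) :=
    PySem.Dict.getD_counter allpB r
  have h2 : pairB.getD r 0 = (((cwrSums allpA).count r : Nat) : Int) :=
    PySem.Dict.getD_counter (cwrSums allpB) r
  rw [iloopA_eq r allpA allpA_pairwise allpA_pos cnt, h1, h2]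
  simp [List.count, Int.add_assoc]

theorem dloop_eq (n : Int) :
    ∀ (l : List Int), l.Pairwise (· < ·) → ∀ cnt, dloopA n l cnt = dloopB n l cnt := by
  intro l
  induction l with
  | nil => intro _ cnt; rfl
  | cons d ds ih =>
    intro hp cnt
    rcases List.pairwise_cons.mp hp with ⟨hlt, hp'⟩
    by_cases hgt : d > n
    · simp [dloopA, dloopB, hgt]
    · by_cases heq : d = n
      · have hbeq : (d == n) = true := by simpa using heq
        have htail : dloopB n ds (cnt + 1) = cnt + 1 := by
          cases ds with
          | nil => rfl
          | cons d' ds' =>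
            have : d' > n := by have := hlt d' (by simp); omega
            simp [dloopB, this]
        simp [dloopA, dloopB, hgt, hbeq, htail]
      · have hbeq : (d == n) = false := by simpa using heq
        simp [dloopA, dloopB, hgt, hbeq, inner_eq, ih hp']

theorem doublesA_pairwise : doublesA.Pairwise (· < ·) := by decide

-- ===== VERDICT (by name: the statement is the Claim_ definition above) =====
theorem c_spec : Claim_equal_c := by
  intro n _
  unfold Spec_c c c_alt
  have : doublesB = doublesA := rfl
  rw [this]
  exact dloop_eq n doublesA doublesA_pairwise 0
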